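-- pv_equiv track=rewrite | github.com/Ashok-19/ARC-GEN-validator | common.py | hollow_rect
-- ===== SOURCE A (Python) =====
-- def draw(ingrid, r, c, color):
--   if r >= 0 and c >= 0 and r < len(ingrid) and c < len(ingrid[r]):
--     ingrid[r][c] = color
--
-- def get_pixel(ingrid, r, c):
--   if r >= 0 and c >= 0 and r < len(ingrid) and c < len(ingrid[r]):
--     return ingrid[r][c]
--   return -1
--
-- def hollow_rect(ingrid, width, height, row, col, color, must_be_zero=False):
--   """Draws a hollow rectangle in a grid."""
--   for r in range(height):
--     for c in range(width):
--       if r in [0, height - 1] or c in [0, width - 1]: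
--         if must_be_zero and get_pixel(ingrid, row + r, col + c) not in [-1, 0]:
--           return False
--         draw(ingrid, row + r, col + c, color)
--   return True
-- ===== SOURCE B (Python) =====
-- def draw(ingrid, r, c, color):
--   if r >= 0 and c >= 0 and r < len(ingrid) and c < len(ingrid[r]):
--     ingrid[r][c] = color
--
-- def get_pixel(ingrid, r, c):
--   if r >= 0 and c >= 0 and r < len(ingrid) and c < len(ingrid[r]):
--     return ingrid[r][c]
--   return -1
--
-- def hollow_rect(ingrid, width, height, row, col, color, must_be_zero=False):
--   """Draws a hollow rectangle border, visiting only perimeter cells (row-major)."""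
--   if height <= 0 or width <= 0:
--     return True
--   coords = [(0, c) for c in range(width)]
--   for r in range(1, height - 1):
--     coords.append((r, 0))
--     if width > 1:
--       coords.append((r, width - 1))
--   if height > 1:
--     coords += [(height - 1, c) for c in range(width)]
--   for r, c in coords:
--     if must_be_zero and get_pixel(ingrid, row + r, col + c) not in (-1, 0):
--       return False
--     draw(ingrid, row + r, col + c, color)
--   return True
-- ===== Notes on version B (the rewrite author's own statement) =====
-- stated objective: faster
-- what changed: B builds the perimeter coordinate list (top row, edge columns of middle rows, bottom row, in A's row-major order) and processes only those cells, instead of scanning all width*height cells and testing each for being on the border.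
import Mathlib
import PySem

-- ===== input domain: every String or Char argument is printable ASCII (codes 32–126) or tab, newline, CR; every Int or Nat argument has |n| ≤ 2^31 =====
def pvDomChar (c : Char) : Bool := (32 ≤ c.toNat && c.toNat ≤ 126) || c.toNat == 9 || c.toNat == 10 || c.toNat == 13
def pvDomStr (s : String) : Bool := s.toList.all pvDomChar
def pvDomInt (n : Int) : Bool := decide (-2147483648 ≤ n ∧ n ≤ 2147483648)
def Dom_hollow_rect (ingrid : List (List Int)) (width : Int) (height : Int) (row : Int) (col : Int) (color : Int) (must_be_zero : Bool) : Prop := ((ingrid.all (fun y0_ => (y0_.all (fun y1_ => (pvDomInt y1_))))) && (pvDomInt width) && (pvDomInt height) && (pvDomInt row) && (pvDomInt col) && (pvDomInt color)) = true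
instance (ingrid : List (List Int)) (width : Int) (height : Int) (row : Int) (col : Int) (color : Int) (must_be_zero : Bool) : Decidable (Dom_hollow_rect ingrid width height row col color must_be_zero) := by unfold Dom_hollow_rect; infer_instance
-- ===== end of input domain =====

-- B visits only the perimeter cells (same row-major order as A) instead of scanning the
-- whole width×height box; equivalence is about the RETURN value (both Pythons also mutate
-- ingrid identically, cell for cell in the same order).

-- ===== PORT A =====
-- get_pixel(ingrid, r, c): exact port of the bounds-checked read (out of bounds → -1)
def pvGetPixel (g : List (List Int)) (r c : Int) : Int :=
  if 0 ≤ r ∧ 0 ≤ c ∧ r < (g.length : Int) ∧ c < ((g.getD r.toNat []).length : Int) then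
    (g.getD r.toNat []).getD c.toNat (-1)
  else -1

-- draw(ingrid, r, c, color): exact port of the bounds-checked write (functional update)
def pvDraw (g : List (List Int)) (r c color : Int) : List (List Int) :=
  if 0 ≤ r ∧ 0 ≤ c ∧ r < (g.length : Int) ∧ c < ((g.getD r.toNat []).length : Int) then
    g.set r.toNat ((g.getD r.toNat []).set c.toNat color)
  else g

-- the per-cell body both Pythons share: zero-check (early return = none) then draw
def pvStep (row col color : Int) (mbz : Bool)
    (st : Option (List (List Int))) (rc : Int × Int) : Option (List (List Int)) :=
  match st with
  | none => none
  | some g =>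
      if mbz ∧ ¬(pvGetPixel g (row + rc.1) (col + rc.2) = -1 ∨
                 pvGetPixel g (row + rc.1) (col + rc.2) = 0) then none
      else some (pvDraw g (row + rc.1) (col + rc.2) color)

def hollow_rect (ingrid : List (List Int)) (width : Int) (height : Int) (row : Int) (col : Int) (color : Int) (must_be_zero : Bool) : Bool :=
  ((PySem.List.pyRange 0 height 1).foldl (fun st r =>
      (PySem.List.pyRange 0 width 1).foldl (fun st c =>
        if r = 0 ∨ r = height - 1 ∨ c = 0 ∨ c = width - 1 then
          pvStep row col color must_be_zero st (r, c)
        else st) st)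
    (some ingrid)).isSome

-- ===== PORT B =====
-- the perimeter coordinate list Source B builds (row-major)
def pvCoordsB (width height : Int) : List (Int × Int) :=
  (((PySem.List.pyRange 0 width 1).map (fun c => ((0 : Int), c))) ++
   ((PySem.List.pyRange 1 (height - 1) 1).flatMap (fun r =>
      [(r, (0 : Int))] ++ (if 1 < width then [(r, width - 1)] else [])))) ++
  (if 1 < height then (PySem.List.pyRange 0 width 1).map (fun c => (height - 1, c)) else [])

def hollow_rect_alt (ingrid : List (List Int)) (width : Int) (height : Int) (row : Int) (col : Int) (color : Int) (must_be_zero : Bool) : Bool :=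
  if height ≤ 0 ∨ width ≤ 0 then true
  else
    ((pvCoordsB width height).foldl (pvStep row col color must_be_zero) (some ingrid)).isSome

-- ===== PRECONDITION & SPEC =====
def Spec_hollow_rect (ingrid : List (List Int)) (width : Int) (height : Int) (row : Int) (col : Int) (color : Int) (must_be_zero : Bool) (out : Bool) : Prop := out = hollow_rect_alt ingrid width height row col color must_be_zero
instance (ingrid : List (List Int)) (width : Int) (height : Int) (row : Int) (col : Int) (color : Int) (must_be_zero : Bool) (out : Bool) : Decidable (Spec_hollow_rect ingrid width height row col color must_be_zero out) := by unfold Spec_hollow_rect; infer_instance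

-- ===== CLAIM (what is proved, stated in full; the proofs are below) =====
def Claim_equal_hollow_rect : Prop := ∀ (ingrid : List (List Int)) (width : Int) (height : Int) (row : Int) (col : Int) (color : Int) (must_be_zero : Bool), Dom_hollow_rect ingrid width height row col color must_be_zero → Spec_hollow_rect ingrid width height row col color must_be_zero (hollow_rect ingrid width height row col color must_be_zero)

-- ===== LEMMAS AND PROOFS =====

-- the row-major filtered coordinate list A effectively traverses
def pvCoordsA (width height : Int) : List (Int × Int) :=
  (PySem.List.pyRange 0 height 1).flatMap (fun r =>
    ((PySem.List.pyRange 0 width 1).filter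
        (fun c => decide (r = 0 ∨ r = height - 1 ∨ c = 0 ∨ c = width - 1))).map
      (fun c => (r, c)))

-- A's nested loops are the single fold of pvStep over pvCoordsA
theorem hollow_rect_eq_fold (ingrid : List (List Int)) (width height row col color : Int)
    (mbz : Bool) :
    hollow_rect ingrid width height row col color mbz =
      ((pvCoordsA width height).foldl (pvStep row col color mbz) (some ingrid)).isSome := by
  unfold hollow_rect pvCoordsA
  rw [List.foldl_flatMap]
  simp only [List.foldl_map, PySem.List.foldl_ite_eq_foldl_filter]

-- the filter of a full row of columns down to its two edge columns
theorem filter_edges (w : Int) (hw : 1 ≤ w) :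
    (PySem.List.pyRange 0 w 1).filter (fun c => decide (c = 0 ∨ c = w - 1)) =
      if 1 < w then [0, w - 1] else [(0 : Int)] := by
  rcases eq_or_lt_of_le hw with h1 | h2
  · have : w = 1 := h1.symm
    subst this
    decide
  · rw [PySem.List.pyRange_one_cons (by omega)]
    simp only [zero_add]
    rw [PySem.List.pyRange_one_append 1 (w - 1) w (by omega) (by omega),
       PySem.List.pyRange_one_cons (show w - 1 < w by omega),
       PySem.List.pyRange_one_eq_nil (show w ≤ w - 1 + 1 by omega)]
    simp [h2]
    intro a h1 h3
    omega

-- the two coordinate lists coincide (A's is empty exactly when B skips the loop)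
theorem coordsA_eq (width height : Int) :
    pvCoordsA width height =
      if height ≤ 0 ∨ width ≤ 0 then [] else pvCoordsB width height := by
  by_cases hh : height ≤ 0
  · simp [pvCoordsA, PySem.List.pyRange_one_eq_nil hh, hh]
  by_cases hw : width ≤ 0
  · simp [pvCoordsA, PySem.List.pyRange_one_eq_nil hw, hh, hw]
  simp only [if_neg (by omega : ¬(height ≤ 0 ∨ width ≤ 0))]
  unfold pvCoordsA pvCoordsB
  rcases eq_or_lt_of_le (by omega : (1:Int) ≤ height) with h1 | h2
  · -- height = 1 : single row, fully on the border
    have : height = 1 := h1.symm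
    subst this
    rw [PySem.List.pyRange_one_cons (by norm_num : (0:Int) < 1)]
    simp only [zero_add]
    rw [PySem.List.pyRange_one_eq_nil (le_refl 1),
       PySem.List.pyRange_one_eq_nil (by norm_num : (1:Int) - 1 ≤ 1)]
    simp
  · -- height ≥ 2 : top row, middle rows (edges only), bottom row
    rw [PySem.List.pyRange_one_cons (by omega : (0:Int) < height)]
    simp only [zero_add]
    rw [PySem.List.pyRange_one_append 1 (height - 1) height (by omega) (by omega),
       PySem.List.pyRange_one_cons (show height - 1 < height by omega),
       PySem.List.pyRange_one_eq_nil (by omega : height ≤ height - 1 + 1)]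
    simp only [List.flatMap_cons, List.flatMap_append, List.flatMap_nil, List.append_nil, true_or, or_true, decide_true, List.filter_true]
    have hmid : (PySem.List.pyRange 1 (height - 1) 1).flatMap (fun r =>
        ((PySem.List.pyRange 0 width 1).filter
            (fun c => decide (r = 0 ∨ r = height - 1 ∨ c = 0 ∨ c = width - 1))).map
          (fun c => (r, c))) =
        (PySem.List.pyRange 1 (height - 1) 1).flatMap (fun r =>
          [(r, (0 : Int))] ++ (if 1 < width then [(r, width - 1)] else [])) := by
      apply List.flatMap_congr
      intro r hr
      rw [PySem.List.mem_pyRange_one] at hr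
      have hpred : ∀ c ∈ PySem.List.pyRange 0 width 1,
          decide (r = 0 ∨ r = height - 1 ∨ c = 0 ∨ c = width - 1) =
            decide (c = 0 ∨ c = width - 1) := by
        intro c _
        simp only [decide_eq_decide]
        omega
      rw [List.filter_congr hpred, filter_edges width (by omega)]
      by_cases hw1 : 1 < width <;> simp [hw1]
    rw [hmid]
    simp [h2, List.append_assoc]

-- ===== VERDICT (by name: the statement is the Claim_ definition above) =====
theorem hollow_rect_spec : Claim_equal_hollow_rect := by
  intro ingrid width height row col color mbz _
  unfold Spec_hollow_rect hollow_rect_alt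
  rw [hollow_rect_eq_fold, coordsA_eq]
  by_cases h : height ≤ 0 ∨ width ≤ 0 <;> simp [h]
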